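-- pv_equiv track=rewrite | github.com/thekaranparikh/locustMRAWS | swarm_logic01/logic02.py | _score_waypoints
-- ===== SOURCE A (Python) =====
-- SNAP        = 5     # pixel tolerance
--
-- def _close(a, b):       return abs(a - b) < SNAP
--
-- def _score_waypoints(waypoints, start, facing):
--     """Simulate X-first movement through waypoints; return (steps, turns, final_facing)."""
--     pos, steps, turns, cur = start, 0, 0, facing
--     for wp in waypoints:
--         if not _close(pos[0], wp[0]):
--             nd = (1 if wp[0] > pos[0] else -1, 0)
--             if nd != cur: turns += 1; cur = nd
--             steps += abs(round(wp[0] - pos[0]))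
--             pos = (wp[0], pos[1])
--         if not _close(pos[1], wp[1]):
--             nd = (0, 1 if wp[1] > pos[1] else -1)
--             if nd != cur: turns += 1; cur = nd
--             steps += abs(round(wp[1] - pos[1]))
--             pos = (wp[0], wp[1])
--     return steps, turns, cur
-- ===== SOURCE B (Python) =====
-- SNAP = 5     # pixel tolerance
--
-- def _close(a, b):       return abs(a - b) < SNAP
--
-- def _score_waypoints(waypoints, start, facing):
--     """Two-pass version: first collect the axis moves, then reduce them."""
--     # pass 1: record each axis move as (direction, distance), updating pos
--     moves, pos = [], start
--     for wp in waypoints: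
--         if not _close(pos[0], wp[0]):
--             moves.append(((1 if wp[0] > pos[0] else -1, 0), abs(round(wp[0] - pos[0]))))
--             pos = (wp[0], pos[1])
--         if not _close(pos[1], wp[1]):
--             moves.append(((0, 1 if wp[1] > pos[1] else -1), abs(round(wp[1] - pos[1]))))
--             pos = (wp[0], wp[1])
--     # pass 2: steps is the total distance; turns counts adjacent direction
--     # changes in facing,d1,d2,...; final facing is the last direction taken
--     steps = sum(d for _, d in moves)
--     dirs = [nd for nd, _ in moves]
--     seq = [facing] + dirs
--     turns = sum(1 for p, q in zip(seq, seq[1:]) if p != q)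
--     return steps, turns, (dirs[-1] if dirs else facing)
-- ===== Notes on version B (the rewrite author's own statement) =====
-- stated objective: alternative
-- what changed: A interleaves step/turn/facing accounting inside the simulation loop; B first collects the list of axis moves (direction, distance) in one simulation pass, then computes steps as a sum, turns as a count of adjacent direction changes in the facing-prefixed direction sequence, and the final facing as the last direction.
import Mathlib
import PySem

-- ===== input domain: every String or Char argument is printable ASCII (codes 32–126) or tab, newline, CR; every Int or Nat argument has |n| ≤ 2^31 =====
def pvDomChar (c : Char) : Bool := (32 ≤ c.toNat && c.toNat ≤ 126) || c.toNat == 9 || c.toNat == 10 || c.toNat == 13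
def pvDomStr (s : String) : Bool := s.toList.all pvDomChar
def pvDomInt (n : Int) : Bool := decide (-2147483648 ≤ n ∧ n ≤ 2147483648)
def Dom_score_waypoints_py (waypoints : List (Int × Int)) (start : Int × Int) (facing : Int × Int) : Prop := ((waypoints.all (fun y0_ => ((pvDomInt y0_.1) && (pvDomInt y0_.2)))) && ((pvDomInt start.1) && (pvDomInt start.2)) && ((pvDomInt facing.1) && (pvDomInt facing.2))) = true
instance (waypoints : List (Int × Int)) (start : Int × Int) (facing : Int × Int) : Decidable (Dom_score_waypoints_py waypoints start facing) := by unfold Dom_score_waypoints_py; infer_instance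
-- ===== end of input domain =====

-- B changes the decomposition (one simulation pass collecting moves, then a separate reduce for steps/turns/facing); same cost, objective: alternative.

-- ===== PORT A =====
-- state is (pos, steps, turns, cur); round on ints is the identity
def aStep (st : (Int × Int) × Int × Int × (Int × Int)) (wp : Int × Int) :
    (Int × Int) × Int × Int × (Int × Int) :=
  let pos := st.1; let steps := st.2.1; let turns := st.2.2.1; let cur := st.2.2.2
  let st1 : (Int × Int) × Int × Int × (Int × Int) :=
    if ¬ (|pos.1 - wp.1| < 5) then
      let nd : Int × Int := (if wp.1 > pos.1 then 1 else -1, 0)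
      let turns := if nd ≠ cur then turns + 1 else turns
      let cur := if nd ≠ cur then nd else cur
      ((wp.1, pos.2), steps + |wp.1 - pos.1|, turns, cur)
    else (pos, steps, turns, cur)
  let pos := st1.1; let steps := st1.2.1; let turns := st1.2.2.1; let cur := st1.2.2.2
  if ¬ (|pos.2 - wp.2| < 5) then
    let nd : Int × Int := (0, if wp.2 > pos.2 then 1 else -1)
    let turns := if nd ≠ cur then turns + 1 else turns
    let cur := if nd ≠ cur then nd else cur
    ((wp.1, wp.2), steps + |wp.2 - pos.2|, turns, cur)
  else (pos, steps, turns, cur)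

def aLoop : List (Int × Int) → ((Int × Int) × Int × Int × (Int × Int)) → ((Int × Int) × Int × Int × (Int × Int))
  | [], st => st
  | wp :: rest, st => aLoop rest (aStep st wp)

def score_waypoints_py (waypoints : List (Int × Int)) (start : Int × Int) (facing : Int × Int) : Int × Int × (Int × Int) :=
  let st := aLoop waypoints (start, 0, 0, facing)
  (st.2.1, st.2.2.1, st.2.2.2)

-- ===== PORT B =====
-- pass 1: the move list (direction, distance) and the final position
def bMoves : List (Int × Int) → (Int × Int) → (List ((Int × Int) × Int)) × (Int × Int)
  | [], pos => ([], pos)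
  | wp :: rest, pos =>
    let p1 : (List ((Int × Int) × Int)) × (Int × Int) :=
      if ¬ (|pos.1 - wp.1| < 5) then
        ([((if wp.1 > pos.1 then 1 else -1, 0), |wp.1 - pos.1|)], (wp.1, pos.2))
      else ([], pos)
    let p2 : (List ((Int × Int) × Int)) × (Int × Int) :=
      if ¬ (|p1.2.2 - wp.2| < 5) then
        ([((0, if wp.2 > p1.2.2 then 1 else -1), |wp.2 - p1.2.2|)], (wp.1, wp.2))
      else ([], p1.2)
    let rest' := bMoves rest p2.2
    (p1.1 ++ p2.1 ++ rest'.1, rest'.2)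

def score_waypoints_py_alt (waypoints : List (Int × Int)) (start : Int × Int) (facing : Int × Int) : Int × Int × (Int × Int) :=
  let moves := (bMoves waypoints start).1
  let steps := (moves.map (·.2)).sum
  let dirs := moves.map (·.1)
  let seq := facing :: dirs
  let turns : Int := ((seq.zip seq.tail).countP (fun p => p.1 != p.2) : Nat)
  (steps, turns, dirs.getLastD facing)

-- ===== PRECONDITION & SPEC =====
def Spec_score_waypoints_py (waypoints : List (Int × Int)) (start : Int × Int) (facing : Int × Int) (out : Int × Int × (Int × Int)) : Prop := out = score_waypoints_py_alt waypoints start facing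
instance (waypoints : List (Int × Int)) (start : Int × Int) (facing : Int × Int) (out : Int × Int × (Int × Int)) : Decidable (Spec_score_waypoints_py waypoints start facing out) := by unfold Spec_score_waypoints_py; infer_instance

-- ===== CLAIM (what is proved, stated in full; the proofs are below) =====
def Claim_equal_score_waypoints_py : Prop := ∀ (waypoints : List (Int × Int)) (start : Int × Int) (facing : Int × Int), Dom_score_waypoints_py waypoints start facing → Spec_score_waypoints_py waypoints start facing (score_waypoints_py waypoints start facing)

-- ===== LEMMAS AND PROOFS =====
-- red replays A's interleaved accounting over a move list
def red : Int → Int → (Int × Int) → List ((Int × Int) × Int) → Int × Int × (Int × Int)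
  | s, t, c, [] => (s, t, c)
  | s, t, c, (d, n) :: ms => red (s + n) (if d ≠ c then t + 1 else t) d ms

theorem ite_eq_id (d c : Int × Int) : (if d = c then c else d) = d := by
  split_ifs with h <;> simp [h]

theorem loop_eq (wps : List (Int × Int)) : ∀ (pos : Int × Int) (s t : Int) (c : Int × Int),
    aLoop wps (pos, s, t, c) = ((bMoves wps pos).2, red s t c (bMoves wps pos).1) := by
  induction wps with
  | nil => intro pos s t c; simp [aLoop, bMoves, red]
  | cons wp rest ih =>
    intro pos s t c
    show aLoop rest (aStep (pos, s, t, c) wp) = _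
    simp only [bMoves]
    have hdx : ¬ ((0:Int) = if pos.1 < wp.1 then (1:Int) else -1) := by split_ifs <;> decide
    by_cases hx : |pos.1 - wp.1| < 5 <;>
      by_cases hy : |pos.2 - wp.2| < 5 <;>
      simp [aStep, hx, hy, hdx, ite_eq_id, red, ih, Prod.mk.injEq]

theorem red_eval (ms : List ((Int × Int) × Int)) : ∀ (s t : Int) (c : Int × Int),
    red s t c ms = (s + (ms.map (·.2)).sum,
      t + (((c :: ms.map (·.1)).zip (ms.map (·.1))).countP (fun p => p.1 != p.2) : Nat),
      (ms.map (·.1)).getLastD c) := by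
  induction ms with
  | nil => intro s t c; simp [red]
  | cons x ms ih =>
    intro s t c
    obtain ⟨d, n⟩ := x
    simp only [red, ih, List.map_cons, List.sum_cons, List.zip_cons_cons, List.countP_cons,
      List.getLastD_cons, Prod.mk.injEq]
    refine ⟨by ring, ?_, trivial⟩
    by_cases h : d = c
    · subst h; simp
    · have h' : ¬ (c = d) := fun hh => h hh.symm
      simp only [h, h', bne_iff_ne, ne_eq, not_false_iff, if_true]
      push_cast
      ring

-- ===== VERDICT (by name: the statement is the Claim_ definition above) =====
theorem score_waypoints_py_spec : Claim_equal_score_waypoints_py := by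
  intro waypoints start facing _
  show _ = _
  simp [score_waypoints_py, score_waypoints_py_alt, loop_eq, red_eval]
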